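-- pv_equiv track=rewrite | github.com/egwyl666/SXP-Scanner | sxp.py | checksum_icmp
-- ===== SOURCE A (Python) =====
-- def checksum_icmp(source_string):
--     sum = 0
--     count_to = (len(source_string) // 2) * 2
--     count = 0
--     while count < count_to:
--         this_val = source_string[count + 1] * 256 + source_string[count]
--         sum = sum + this_val
--         sum = sum & 0xffffffff
--         count = count + 2
--
--     if count_to < len(source_string):
--         sum = sum + source_string[len(source_string) - 1]
--         sum = sum & 0xffffffff
--
--     sum = (sum >> 16) + (sum & 0xffff)
--     sum = sum + (sum >> 16)
--     answer = ~sum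
--     answer = answer & 0xffff
--     answer = answer >> 8 | (answer << 8 & 0xff00)
--     return answer
-- ===== SOURCE B (Python) =====
-- def checksum_icmp(source_string):
--     # Split by index parity: even-index bytes are the low bytes of A's 16-bit
--     # words, odd-index bytes the high bytes; an odd-length trailing byte has an
--     # even index, so it is counted with weight 1 automatically (no branch).
--     total = (sum(source_string[0::2]) + (sum(source_string[1::2]) << 8)) & 0xffffffff
--     total = (total >> 16) + (total & 0xffff)
--     total = total + (total >> 16)
--     answer = ~total & 0xffff
--     return answer >> 8 | (answer << 8 & 0xff00)
-- ===== Notes on version B (the rewrite author's own statement) =====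
-- stated objective: faster
-- what changed: Instead of A's index-driven while loop that assembles 16-bit words pairwise with a 32-bit mask every iteration plus a special-cased trailing-odd-byte branch, B splits the input by index parity into two strided slices, sums each once in bulk, combines them as lo_sum + (hi_sum << 8), and masks once; the trailing-byte branch disappears because an odd-length input's last byte has even index and lands in the low slice.
import Mathlib
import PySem

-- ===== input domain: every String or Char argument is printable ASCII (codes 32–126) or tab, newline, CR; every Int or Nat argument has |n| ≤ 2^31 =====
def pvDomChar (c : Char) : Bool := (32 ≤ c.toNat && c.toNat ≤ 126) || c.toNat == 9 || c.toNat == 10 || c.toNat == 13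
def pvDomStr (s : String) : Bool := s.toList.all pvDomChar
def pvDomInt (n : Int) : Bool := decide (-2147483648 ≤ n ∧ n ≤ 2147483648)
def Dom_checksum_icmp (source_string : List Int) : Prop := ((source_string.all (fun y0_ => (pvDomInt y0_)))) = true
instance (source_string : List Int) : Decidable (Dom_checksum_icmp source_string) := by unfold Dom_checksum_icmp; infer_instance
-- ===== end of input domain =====

-- B replaces A's pairwise while loop (per-iteration 32-bit mask, special trailing-odd-byte
-- branch) by two parity-strided slice sums combined as lo + (hi << 8) with one final mask;
-- objective: faster (measured constant-factor: bulk slice sums, one mask, no per-iteration work).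

-- ===== PORT A =====
-- the while loop: count advances by 2 until count_to; sum is masked each iteration
def checksumLoop (s : List Int) (countTo count sum : Int) : Int :=
  if count < countTo then
    checksumLoop s countTo (count + 2)
      (PySem.Int.band (sum + (PySem.List.pyGetD s (count + 1) 0 * 256 + PySem.List.pyGetD s count 0)) 4294967295)
  else sum
termination_by (countTo - count).toNat
decreasing_by omega

def checksum_icmp (source_string : List Int) : Int :=
  let countTo := PySem.Int.floordiv (source_string.length : Int) 2 * 2
  let sum := checksumLoop source_string countTo 0 0
  let sum := if countTo < (source_string.length : Int) then
      PySem.Int.band (sum + PySem.List.pyGetD source_string ((source_string.length : Int) - 1) 0) 4294967295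
    else sum
  let sum := (sum >>> (16 : Nat)) + PySem.Int.band sum 65535
  let sum := sum + (sum >>> (16 : Nat))
  let answer := PySem.Int.band (Int.not sum) 65535
  PySem.Int.bor (answer >>> (8 : Nat)) (PySem.Int.band (answer <<< (8 : Nat)) 65280)

-- ===== PORT B =====
-- source_string[0::2] / source_string[1::2]: step 2 ≠ 0, so slice? is always some; .getD [] only discharges the Option
def checksum_icmp_alt (source_string : List Int) : Int :=
  let lo := ((PySem.List.slice? source_string (some 0) none 2).getD []).sum
  let hi := ((PySem.List.slice? source_string (some 1) none 2).getD []).sum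
  let total := PySem.Int.band (lo + hi <<< (8 : Nat)) 4294967295
  let total := (total >>> (16 : Nat)) + PySem.Int.band total 65535
  let total := total + (total >>> (16 : Nat))
  let answer := PySem.Int.band (Int.not total) 65535
  PySem.Int.bor (answer >>> (8 : Nat)) (PySem.Int.band (answer <<< (8 : Nat)) 65280)

-- ===== PRECONDITION & SPEC =====
def Spec_checksum_icmp (source_string : List Int) (out : Int) : Prop := out = checksum_icmp_alt source_string
instance (source_string : List Int) (out : Int) : Decidable (Spec_checksum_icmp source_string out) := by unfold Spec_checksum_icmp; infer_instance

-- ===== CLAIM (what is proved, stated in full; the proofs are below) =====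
def Claim_equal_checksum_icmp : Prop := ∀ (source_string : List Int), Dom_checksum_icmp source_string → Spec_checksum_icmp source_string (checksum_icmp source_string)

-- ===== LEMMAS AND PROOFS =====

-- every other element starting at the head (what xs[0::2] produces)
def strided : List Int → List Int
  | [] => []
  | [a] => [a]
  | a :: _ :: r => a :: strided r

-- Python's  x & 0xffffffff  on a Nat is  x mod 2^32
lemma nat_mask32 (x : Nat) : x &&& 4294967295 = x % 4294967296 := by
  have h := Nat.and_two_pow_sub_one_eq_mod x 32
  norm_num at h
  exact h

-- Python's  a & 0xffffffff  is  a mod 2^32  for every Int (two's complement, all-ones mask)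
lemma band_mask32 (a : Int) : PySem.Int.band a 4294967295 = a % 4294967296 := by
  have ht : (4294967295 : Int).toNat = 4294967295 := rfl
  by_cases ha : 0 ≤ a
  · unfold PySem.Int.band
    rw [if_pos ha, if_pos (by norm_num : (0:Int) ≤ 4294967295), ht, nat_mask32]
    omega
  · unfold PySem.Int.band
    rw [if_neg ha, if_pos (by norm_num : (0:Int) ≤ 4294967295), ht, Nat.and_comm, nat_mask32]
    omega

lemma getD_cons_shift (x : Int) (xs : List Int) {i : Int} (h : 0 ≤ i) (d : Int) :
    PySem.List.pyGetD (x :: xs) (i + 1) d = PySem.List.pyGetD xs i d := by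
  rw [PySem.List.pyGetD_of_nonneg _ _ (by omega), PySem.List.pyGetD_of_nonneg _ _ h]
  have hi : (i + 1).toNat = i.toNat + 1 := by omega
  rw [hi, List.getD_cons_succ]

lemma getD_cons2 (a b : Int) (xs : List Int) {i : Int} (h : 0 ≤ i) (d : Int) :
    PySem.List.pyGetD (a :: b :: xs) (i + 2) d = PySem.List.pyGetD xs i d := by
  have h2 : i + 2 = (i + 1) + 1 := by ring
  rw [h2, getD_cons_shift _ _ (by omega), getD_cons_shift _ _ h]

-- the stride-2 index walk: filterMap over range of ceil(len/2) picks out strided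
lemma stride2 : ∀ (s : List Int) (c : Nat), c = (s.length + 1) / 2 →
    List.filterMap (fun k => s[2 * k]?) (List.range c) = strided s := by
  intro s
  induction s using strided.induct with
  | case1 =>
    intro c hc; simp at hc; subst hc; simp [strided]
  | case2 a =>
    intro c hc; simp at hc; subst hc
    simp [List.range_succ, strided]
  | case3 a b r ih =>
    intro c hc
    have hc' : c = ((r.length + 1) / 2) + 1 := by simp at hc; omega
    subst hc'
    rw [List.range_succ_eq_map, List.filterMap_cons, List.filterMap_map]
    have h0 : (a :: b :: r)[2 * 0]? = some a := by simp
    rw [h0]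
    have hfun : (fun k => (a :: b :: r)[2 * k]?) ∘ Nat.succ = fun k => r[2 * k]? := by
      funext k
      simp [Function.comp, Nat.mul_succ]
    rw [hfun, ih _ rfl, strided]

lemma sliceE (s : List Int) :
    PySem.List.slice? s (some 0) none 2 = some (strided s) := by
  unfold PySem.List.slice? PySem.List.sliceIndices
  norm_num
  by_cases h : 0 < s.length
  · rw [if_pos h]
    have hcnt : ((((s.length : Int)) + 2 - 1) / 2).toNat = (s.length + 1) / 2 := by omega
    rw [hcnt]
    have hfun : (fun k : Nat => s[((2:Int) * (k:Int)).toNat]?) = fun k : Nat => s[2 * k]? := by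
      funext k
      rw [show ((2:Int) * (k:Int)).toNat = 2 * k by omega]
    rw [hfun]
    exact stride2 s _ rfl
  · rw [if_neg h]
    have hs : s = [] := by cases s with | nil => rfl | cons a t => simp at h
    subst hs; simp [strided]

lemma sliceO (s : List Int) :
    PySem.List.slice? s (some 1) none 2 = some (strided s.tail) := by
  unfold PySem.List.slice? PySem.List.sliceIndices
  norm_num
  cases s with
  | nil => simp [strided]
  | cons x t =>
    simp only [List.length_cons, List.tail_cons]
    push_cast
    rw [show (min (1:Int) ((t.length : Int) + 1)) = 1 by omega]
    have hcnt : (if 1 < t.length + 1 then ((((t.length : Int)) + 1 - 1 + 2 - 1) / 2).toNat else 0)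
        = (t.length + 1) / 2 := by
      split <;> omega
    rw [hcnt]
    have hfun : (fun k : Nat => (x :: t)[((1:Int) + 2 * (k:Int)).toNat]?) = fun k : Nat => t[2 * k]? := by
      funext k
      rw [show ((1:Int) + 2 * (k:Int)).toNat = 2 * k + 1 by omega]
      simp
    rw [hfun]
    exact stride2 t _ rfl

-- loop_shift: stripping one word (two leading elements) from the list and 2 from count_to
lemma loop_shift (rest : List Int) (a b : Int) (countTo : Int) :
    ∀ count sum : Int, 0 ≤ count →
      checksumLoop (a :: b :: rest) (countTo + 2) (count + 2) sum = checksumLoop rest countTo count sum := by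
  have H : ∀ n : Nat, ∀ count sum : Int, 0 ≤ count → (countTo - count).toNat = n →
      checksumLoop (a :: b :: rest) (countTo + 2) (count + 2) sum = checksumLoop rest countTo count sum := by
    intro n
    induction n using Nat.strong_induction_on with
    | _ n ih =>
      intro count sum hc hn
      conv_lhs => rw [checksumLoop.eq_def]
      conv_rhs => rw [checksumLoop.eq_def]
      by_cases h : count < countTo
      · rw [if_pos (show count + 2 < countTo + 2 by omega), if_pos h]
        have e1 : count + 2 + 1 = (count + 1) + 2 := by ring
        rw [e1, getD_cons2 _ _ _ (by omega), getD_cons2 _ _ _ hc]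
        exact ih (countTo - (count + 2)).toNat (by omega) (count + 2) _ (by omega) rfl
      · rw [if_neg (by omega), if_neg h]
  exact fun count sum hc => H (countTo - count).toNat count sum hc rfl

-- B's pre-mask total: low-byte slice sum plus 256 times high-byte slice sum
def bTotal (s : List Int) : Int := (strided s).sum + (strided s.tail).sum * 256

lemma strided_cons_tail (b : Int) (r : List Int) : strided (b :: r) = b :: strided r.tail := by
  cases r with
  | nil => rfl
  | cons c r' => rfl

lemma bTotal_cons2 (a b : Int) (r : List Int) : bTotal (a :: b :: r) = (a + b * 256) + bTotal r := by
  unfold bTotal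
  rw [show strided (a :: b :: r) = a :: strided r from rfl]
  rw [show (a :: b :: r).tail = b :: r from rfl, strided_cons_tail]
  simp
  ring

lemma main_sum (s : List Int) : ∀ x : Int, 0 ≤ x → x < 4294967296 →
    (if PySem.Int.floordiv (s.length : Int) 2 * 2 < (s.length : Int) then
        PySem.Int.band (checksumLoop s (PySem.Int.floordiv (s.length : Int) 2 * 2) 0 x
          + PySem.List.pyGetD s ((s.length : Int) - 1) 0) 4294967295
      else checksumLoop s (PySem.Int.floordiv (s.length : Int) 2 * 2) 0 x)
    = (x + bTotal s) % 4294967296 := by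
  induction s using strided.induct with
  | case3 a b rest ih =>
    intro x hx0 hx1
    have hfd : ∀ m : Int, PySem.Int.floordiv m 2 = m / 2 := fun m =>
      PySem.Int.floordiv_eq_ediv_of_pos (by norm_num)
    simp only [List.length_cons, Nat.cast_add, Nat.cast_one, hfd] at ih ⊢
    have hn0 : (0:Int) ≤ (rest.length : Int) := by positivity
    have hct : ((rest.length : Int) + 1 + 1) / 2 * 2 = (rest.length : Int) / 2 * 2 + 2 := by omega
    rw [hct]
    have hx' : (0:Int) ≤ (x + (b * 256 + a)) % 4294967296 ∧
        (x + (b * 256 + a)) % 4294967296 < 4294967296 := by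
      constructor
      · exact Int.emod_nonneg _ (by norm_num)
      · exact Int.emod_lt_of_pos _ (by norm_num)
    have hloop : checksumLoop (a :: b :: rest) ((rest.length : Int) / 2 * 2 + 2) 0 x
        = checksumLoop rest ((rest.length : Int) / 2 * 2) 0 ((x + (b * 256 + a)) % 4294967296) := by
      rw [checksumLoop.eq_def, if_pos (by omega : (0:Int) < (rest.length : Int) / 2 * 2 + 2)]
      rw [show (0:Int) + 1 = 1 by norm_num]
      simp only [PySem.List.pyGetD_ofNat', List.getD_cons_succ, List.getD_cons_zero]
      rw [band_mask32]
      exact loop_shift rest a b _ 0 _ le_rfl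
    rw [bTotal_cons2]
    by_cases hodd : (rest.length : Int) / 2 * 2 < (rest.length : Int)
    · have hr1 : (1:Int) ≤ (rest.length : Int) := by omega
      rw [if_pos (by omega : (rest.length : Int) / 2 * 2 + 2 < (rest.length : Int) + 1 + 1)]
      rw [show (rest.length : Int) + 1 + 1 - 1 = ((rest.length : Int) - 1) + 2 by ring,
        getD_cons2 _ _ _ (by omega), hloop]
      have h2 := ih ((x + (b * 256 + a)) % 4294967296) hx'.1 hx'.2
      rw [if_pos hodd] at h2
      rw [band_mask32] at h2 ⊢
      rw [h2]
      omega
    · rw [if_neg (by omega : ¬ ((rest.length : Int) / 2 * 2 + 2 < (rest.length : Int) + 1 + 1))]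
      rw [hloop]
      have h2 := ih ((x + (b * 256 + a)) % 4294967296) hx'.1 hx'.2
      rw [if_neg hodd] at h2
      rw [h2]
      omega
  | case1 =>
    intro x hx0 hx1
    rw [checksumLoop.eq_def]
    simp [bTotal, strided, PySem.Int.floordiv]
    omega
  | case2 a =>
    intro x hx0 hx1
    rw [checksumLoop.eq_def]
    simp only [List.length_cons, List.length_nil]
    norm_num [show PySem.Int.floordiv 1 2 = 0 from rfl, bTotal, strided,
      band_mask32, PySem.List.pyGetD_ofNat', PySem.List.pyGetD,
      PySem.List.pyGet?, PySem.List.pyIdx?]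

-- ===== VERDICT (by name: the statement is the Claim_ definition above) =====
theorem checksum_icmp_spec : Claim_equal_checksum_icmp := by
  intro s _
  unfold Spec_checksum_icmp
  simp only [checksum_icmp, checksum_icmp_alt]
  rw [sliceE, sliceO]
  simp only [Option.getD_some]
  have h := main_sum s 0 le_rfl (by norm_num)
  have hB : PySem.Int.band ((strided s).sum + (strided s.tail).sum <<< (8 : Nat)) 4294967295
      = (0 + bTotal s) % 4294967296 := by
    rw [band_mask32]
    unfold bTotal
    rw [Int.shiftLeft_eq]
    norm_num
  rw [h.trans hB.symm]
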